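-- pv_equiv track=rewrite | github.com/hokiattila/Malom_Game_NJE | engine/player/greedy_player.py | _would_complete_mill
-- ===== SOURCE A (Python) =====
-- from typing import List
--
-- def _would_complete_mill(board: List[str], position: int, color: str) -> bool:
--     # Fix malom poziciok
--     mills = [
--         [0, 1, 2], [3, 4, 5], [6, 7, 8], [9, 10, 11], [12, 13, 14], [15, 16, 17], [18, 19, 20], [21, 22, 23],
--         [0, 9, 21], [3, 10, 18], [6, 11, 15], [1, 4, 7], [16, 19, 22], [8, 12, 17], [5, 13, 20], [2, 14, 23]
--     ]
--     for mill in mills: # bejarjuk a malom kombinaciokat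
--         if position in mill and all(board[i] == color or i == position for i in mill): # ha a kapott pozicio malmot adna
--             return True # visszaterunk igazzal
--     return False # egyebkent hamissal
-- ===== SOURCE B (Python) =====
-- # Completion-partner table: for each board index, the (two-square) remainders of every
-- # mill that contains it.  Derived once from the fixed 16-mill list of Nine Men's Morris;
-- # the function becomes a flat lookup + pair check, with no mill list and no inner loop.
-- PARTNERS = {
--     0: [(1, 2), (9, 21)],
--     1: [(0, 2), (4, 7)],
--     2: [(0, 1), (14, 23)],
--     3: [(4, 5), (10, 18)],
--     4: [(3, 5), (1, 7)],
--     5: [(3, 4), (13, 20)],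
--     6: [(7, 8), (11, 15)],
--     7: [(6, 8), (1, 4)],
--     8: [(6, 7), (12, 17)],
--     9: [(10, 11), (0, 21)],
--     10: [(9, 11), (3, 18)],
--     11: [(9, 10), (6, 15)],
--     12: [(13, 14), (8, 17)],
--     13: [(12, 14), (5, 20)],
--     14: [(12, 13), (2, 23)],
--     15: [(16, 17), (6, 11)],
--     16: [(15, 17), (19, 22)],
--     17: [(15, 16), (8, 12)],
--     18: [(19, 20), (3, 10)],
--     19: [(18, 20), (16, 22)],
--     20: [(18, 19), (5, 13)],
--     21: [(22, 23), (0, 9)],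
--     22: [(21, 23), (16, 19)],
--     23: [(21, 22), (2, 14)],
-- }
--
-- def _would_complete_mill(board, position, color):
--     return any(board[i] == color and board[j] == color
--                for i, j in PARTNERS.get(position, []))
-- ===== Notes on version B (the rewrite author's own statement) =====
-- stated objective: idiomatic
-- what changed: B replaces the scan over all 16 mills (membership test + all() over each triple) by a precomputed table mapping each board index to the two partner-pair squares that would complete a mill with it, reducing each call to one lookup and at most two pair comparisons.
-- outside the precondition, e.g. on _would_complete_mill([], 0, 'W'): A raises IndexError, B raises IndexError; on _would_complete_mill(['B', 'B', 'B', 'B', 'B', 'B', 'B', 'B', 'B', 'B'], 0, 'W'): A returns False, B returns False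
import Mathlib
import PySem

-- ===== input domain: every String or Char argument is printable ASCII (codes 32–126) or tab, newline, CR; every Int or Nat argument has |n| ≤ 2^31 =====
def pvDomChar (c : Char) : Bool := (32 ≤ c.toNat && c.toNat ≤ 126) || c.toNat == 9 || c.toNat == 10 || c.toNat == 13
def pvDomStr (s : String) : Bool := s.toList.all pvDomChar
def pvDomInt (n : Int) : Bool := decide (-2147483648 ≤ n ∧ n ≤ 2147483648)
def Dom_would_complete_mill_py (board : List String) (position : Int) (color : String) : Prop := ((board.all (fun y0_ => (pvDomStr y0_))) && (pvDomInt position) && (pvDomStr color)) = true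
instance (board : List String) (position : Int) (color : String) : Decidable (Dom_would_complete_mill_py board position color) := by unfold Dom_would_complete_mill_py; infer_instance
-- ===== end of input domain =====

-- B replaces A's scan over the 16 mill triples by a precomputed partner table: each board
-- index maps to the (at most two) pairs of squares that would complete a mill with it (idiomatic).

-- ===== PORT A =====
def pvMillsA : List (List Int) :=
  [[0, 1, 2], [3, 4, 5], [6, 7, 8], [9, 10, 11], [12, 13, 14], [15, 16, 17], [18, 19, 20], [21, 22, 23],
   [0, 9, 21], [3, 10, 18], [6, 11, 15], [1, 4, 7], [16, 19, 22], [8, 12, 17], [5, 13, 20], [2, 14, 23]]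

-- for-loop with early 'return True' = List.any; board[i] ported with pyGetD: exact on Pre_ (index in range when reached)
def would_complete_mill_py (board : List String) (position : Int) (color : String) : Bool :=
  pvMillsA.any (fun mill =>
    decide (position ∈ mill) &&
      mill.all (fun i => (PySem.List.pyGetD board i "" == color) || decide (i == position)))

-- ===== PORT B =====
-- PARTNERS from Source B, a literal dict: index -> remainders of the mills containing it
def pvPartners : PySem.Dict Int (List (Int × Int)) := PySem.Dict.mk
  [((0 : Int), [(1, 2), (9, 21)]), ((1 : Int), [(0, 2), (4, 7)]), ((2 : Int), [(0, 1), (14, 23)]),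
   ((3 : Int), [(4, 5), (10, 18)]), ((4 : Int), [(3, 5), (1, 7)]), ((5 : Int), [(3, 4), (13, 20)]),
   ((6 : Int), [(7, 8), (11, 15)]), ((7 : Int), [(6, 8), (1, 4)]), ((8 : Int), [(6, 7), (12, 17)]),
   ((9 : Int), [(10, 11), (0, 21)]), ((10 : Int), [(9, 11), (3, 18)]), ((11 : Int), [(9, 10), (6, 15)]),
   ((12 : Int), [(13, 14), (8, 17)]), ((13 : Int), [(12, 14), (5, 20)]), ((14 : Int), [(12, 13), (2, 23)]),
   ((15 : Int), [(16, 17), (6, 11)]), ((16 : Int), [(15, 17), (19, 22)]), ((17 : Int), [(15, 16), (8, 12)]),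
   ((18 : Int), [(19, 20), (3, 10)]), ((19 : Int), [(18, 20), (16, 22)]), ((20 : Int), [(18, 19), (5, 13)]),
   ((21 : Int), [(22, 23), (0, 9)]), ((22 : Int), [(21, 23), (16, 19)]), ((23 : Int), [(21, 22), (2, 14)])]

def would_complete_mill_py_alt (board : List String) (position : Int) (color : String) : Bool :=
  (pvPartners.getD position []).any (fun p =>
    (PySem.List.pyGetD board p.1 "" == color) && (PySem.List.pyGetD board p.2 "" == color))

-- ===== PRECONDITION & SPEC =====
-- Pre_ excludes boards shorter than 24 entries when position is a board index 0..23: there A may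
-- raise IndexError mid-scan (board[i] on a missing index) depending on the board's contents.
def Pre_would_complete_mill_py (board : List String) (position : Int) (color : String) : Prop :=
  position < 0 ∨ 23 < position ∨ 24 ≤ (board.length : Int)
instance (board : List String) (position : Int) (color : String) : Decidable (Pre_would_complete_mill_py board position color) := by unfold Pre_would_complete_mill_py; infer_instance

def pvWitness_would_complete_mill_py : List String × Int × String := (List.replicate 24 "", 0, "W")

def Spec_would_complete_mill_py (board : List String) (position : Int) (color : String) (out : Bool) : Prop := out = would_complete_mill_py_alt board position color
instance (board : List String) (position : Int) (color : String) (out : Bool) : Decidable (Spec_would_complete_mill_py board position color out) := by unfold Spec_would_complete_mill_py; infer_instance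

-- ===== CLAIM (what is proved, stated in full; the proofs are below) =====
def Claim_equal_would_complete_mill_py : Prop := ∀ (board : List String) (position : Int) (color : String), Dom_would_complete_mill_py board position color → Pre_would_complete_mill_py board position color → Spec_would_complete_mill_py board position color (would_complete_mill_py board position color)

-- ===== LEMMAS AND PROOFS =====
theorem partners_get?_none (position : Int) (h : position < 0 ∨ 23 < position) :
    pvPartners.get? position = none := by
  rw [PySem.Dict.get?_eq_none_iff_not_mem_keys]
  simp [pvPartners, PySem.Dict.keys]
  omega

theorem pv_out (board : List String) (position : Int) (color : String)
    (h : position < 0 ∨ 23 < position) :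
    would_complete_mill_py board position color = would_complete_mill_py_alt board position color := by
  have hA : would_complete_mill_py board position color = false := by
    unfold would_complete_mill_py
    rw [List.any_eq_false]
    intro mill hm
    have hnm : position ∉ mill := by
      simp only [pvMillsA, List.mem_cons, List.not_mem_nil, or_false] at hm
      rcases hm with rfl|rfl|rfl|rfl|rfl|rfl|rfl|rfl|rfl|rfl|rfl|rfl|rfl|rfl|rfl|rfl <;>
        simp <;> omega
    simp [hnm]
  have hB : would_complete_mill_py_alt board position color = false := by
    unfold would_complete_mill_py_alt
    rw [PySem.Dict.getD_eq_get?_getD, partners_get?_none position h]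
    rfl
  rw [hA, hB]

-- ===== VERDICT (by name: the statement is the Claim_ definition above) =====
theorem would_complete_mill_py_spec : Claim_equal_would_complete_mill_py := by
  intro board position color _ _
  unfold Spec_would_complete_mill_py
  by_cases hlo : 0 ≤ position
  · by_cases hhi : position ≤ 23
    · rw [would_complete_mill_py_alt]
      interval_cases position <;>
        simp [would_complete_mill_py, pvMillsA, pvPartners, PySem.Dict.getD_eq_get?_getD,
          PySem.Dict.get?_mk_cons]
    · exact pv_out board position color (by omega)
  · exact pv_out board position color (by omega)
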